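-- pv_equiv track=rewrite | github.com/RobbieTmbs/Sokoban-DIDPpy | new2.py | convert_sokoban_to_array
-- ===== SOURCE A (Python) =====
-- def convert_sokoban_to_array(level_lines):
--     char_to_tile = {
--         '#': 0,              # wall
--         '.': 1, '+': 1, '*': 1,  # goal (with or without player/box)
--         ' ': 2, '@': 2, '$': 2   # empty/navigable (with or without player/box)
--     }
--
--     player_pos = None
--     box_positions = []
--
--     max_width = max(len(line.rstrip()) for line in level_lines)
--     puzzle = []
--
--     for y, line in enumerate(level_lines):
--         row = []
--         for x, char in enumerate(line.rstrip().ljust(max_width)):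
--             row.append(char_to_tile.get(char, 2))  # default to 2/empty
--
--             if char in ('@', '+'):
--                 player_pos = (x, y)
--             if char in ('$', '*'):
--                 box_positions.append((x, y))
--         puzzle.append(row)
--
--     return puzzle, player_pos, box_positions
-- ===== SOURCE B (Python) =====
-- def convert_sokoban_to_array(level_lines):
--     rows = [line.rstrip() for line in level_lines]
--     width = max(len(r) for r in rows)
--
--     puzzle = [[0 if c == '#' else 1 if c in '.+*' else 2
--                for c in r.ljust(width)] for r in rows]
--
--     # Work on the level as one flat string; convert flat indices to (x, y).
--     text = '\n'.join(rows)
--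
--     def coords(i):
--         return (i - text.rfind('\n', 0, i) - 1, text.count('\n', 0, i))
--
--     i = max(text.rfind('@'), text.rfind('+'))
--     player_pos = coords(i) if i != -1 else None
--     box_positions = [coords(i) for i, c in enumerate(text) if c in '$*']
--
--     return puzzle, player_pos, box_positions
-- ===== Notes on version B (the rewrite author's own statement) =====
-- stated objective: alternative
-- what changed: Instead of one fused char-by-char nested loop with overwrite/append state, B joins the rstripped lines into one flat string and locates the player with str.rfind and the boxes with a flat-index scan, converting flat indices to (x,y) by newline counting/searching; Pre_ excludes the empty line list (A's max() raises, and so does B's) and line lists where some line still contains a newline after rstrip, which contradicts the line-based input format and breaks the flat-join coordinate arithmetic.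
-- outside the precondition, e.g. on convert_sokoban_to_array(['a\nb@']): A returns ([[2, 2, 2, 2]], (3, 0), []), B returns ([[2, 2, 2, 2]], (1, 1), [])
import Mathlib
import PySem

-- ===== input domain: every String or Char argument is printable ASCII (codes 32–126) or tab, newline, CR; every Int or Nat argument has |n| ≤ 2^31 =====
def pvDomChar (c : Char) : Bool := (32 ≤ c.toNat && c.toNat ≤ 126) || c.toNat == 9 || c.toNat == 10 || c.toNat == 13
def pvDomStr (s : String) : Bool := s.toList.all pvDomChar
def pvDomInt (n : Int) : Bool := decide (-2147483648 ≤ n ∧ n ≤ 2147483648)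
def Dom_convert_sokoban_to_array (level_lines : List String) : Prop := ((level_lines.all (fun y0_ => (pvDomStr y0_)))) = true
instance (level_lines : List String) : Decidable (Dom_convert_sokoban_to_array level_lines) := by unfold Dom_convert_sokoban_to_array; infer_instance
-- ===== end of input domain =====

-- B replaces A's fused char-by-char nested loop by a flat representation: it joins the
-- rstripped lines with '\n' and finds the player (rfind) and boxes (flat index scan)
-- in that single string, converting flat indices to (x, y): an alternative algorithm, same cost.

-- str.ljust(w): pad on the right with spaces up to width w (exact: no-op when len ≥ w)
def pyLjust (cs : List Char) (w : Int) : List Char := cs ++ List.replicate (w.toNat - cs.length) ' '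

-- ===== PORT A =====
def convert_sokoban_to_array (level_lines : List String) : List (List Int) × (Option (Int × Int)) × (List (Int × Int)) :=
  let char_to_tile : PySem.Dict Char Int :=
    (((((((PySem.Dict.empty).insert '#' 0).insert '.' 1).insert '+' 1).insert '*' 1).insert ' ' 2).insert '@' 2).insert '$' 2
  -- max(...) raises ValueError on an empty sequence; Pre_ excludes level_lines = []
  let max_width : Int :=
    (PySem.List.max? (level_lines.map (fun line => PySem.Str.len (PySem.Str.rstrip line))) (fun v => v)).getD 0
  (PySem.List.enumerate level_lines).foldl
    (fun (acc : List (List Int) × Option (Int × Int) × List (Int × Int)) yl =>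
      let inner :=
        (PySem.List.enumerate (pyLjust (PySem.Str.rstrip yl.2).toList max_width)).foldl
          (fun (st : List Int × Option (Int × Int) × List (Int × Int)) xc =>
            (st.1 ++ [char_to_tile.getD xc.2 2],
             if xc.2 = '@' ∨ xc.2 = '+' then some (xc.1, yl.1) else st.2.1,
             if xc.2 = '$' ∨ xc.2 = '*' then st.2.2 ++ [(xc.1, yl.1)] else st.2.2))
          ([], acc.2.1, acc.2.2)
      (acc.1 ++ [inner.1], inner.2.1, inner.2.2))
    ([], none, [])

-- ===== PORT B =====
-- s.rfind(c): index of the last occurrence of the character c in s, -1 if absent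
-- (hand port, exact for a one-character needle)
def pyRfindChar (cs : List Char) (c : Char) : Int :=
  match cs with
  | [] => -1
  | a :: t => let r := pyRfindChar t c; if 0 ≤ r then r + 1 else if a == c then 0 else -1

-- B's coords(i): (i - text.rfind('\n', 0, i) - 1, text.count('\n', 0, i));
-- the bounded rfind/count on text[0:i] are ported as rfind/count on take (0 ≤ i at every call site)
def pvCoords (text : List Char) (i : Int) : Int × Int :=
  (i - pyRfindChar (text.take i.toNat) '\n' - 1, ((text.take i.toNat).count '\n' : Int))

def convert_sokoban_to_array_alt (level_lines : List String) : List (List Int) × (Option (Int × Int)) × (List (Int × Int)) :=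
  let rows := level_lines.map (fun line => (PySem.Str.rstrip line).toList)
  -- max(...) raises ValueError on an empty sequence; Pre_ excludes level_lines = []
  let width : Int := (PySem.List.max? (rows.map (fun r => (r.length : Int))) (fun v => v)).getD 0
  let puzzle := rows.map (fun r =>
    (pyLjust r width).map (fun c => if c = '#' then (0 : Int) else if c = '.' ∨ c = '+' ∨ c = '*' then 1 else 2))
  let text := PySem.Chars.join ['\n'] rows
  let i := max (pyRfindChar text '@') (pyRfindChar text '+')
  let player_pos := if i ≠ -1 then some (pvCoords text i) else none
  let box_positions :=
    ((PySem.List.enumerate text).filter (fun p => p.2 == '$' || p.2 == '*')).map (fun p => pvCoords text p.1)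
  (puzzle, player_pos, box_positions)

-- ===== PRECONDITION & SPEC =====
-- Pre_ excludes (a) the empty line list, on which A's max() raises ValueError (and so does B's),
-- and (b) line lists in which some line still contains '\n' after rstrip: embedded newlines
-- contradict the line-based level format and break B's flat-join coordinate arithmetic.
def Pre_convert_sokoban_to_array (level_lines : List String) : Prop :=
  level_lines ≠ [] ∧ ∀ line ∈ level_lines, '\n' ∉ (PySem.Str.rstrip line).toList
instance (level_lines : List String) : Decidable (Pre_convert_sokoban_to_array level_lines) := by unfold Pre_convert_sokoban_to_array; infer_instance
def pvWitness_convert_sokoban_to_array : List String := ["#@$.#"]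

def Spec_convert_sokoban_to_array (level_lines : List String) (out : List (List Int) × (Option (Int × Int)) × (List (Int × Int))) : Prop := out = convert_sokoban_to_array_alt level_lines
instance (level_lines : List String) (out : List (List Int) × (Option (Int × Int)) × (List (Int × Int))) : Decidable (Spec_convert_sokoban_to_array level_lines out) := by unfold Spec_convert_sokoban_to_array; infer_instance

-- ===== CLAIM (what is proved, stated in full; the proofs are below) =====
def Claim_equal_convert_sokoban_to_array : Prop := ∀ (level_lines : List String), Dom_convert_sokoban_to_array level_lines → Pre_convert_sokoban_to_array level_lines → Spec_convert_sokoban_to_array level_lines (convert_sokoban_to_array level_lines)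

-- ===== LEMMAS AND PROOFS =====

-- A's dict lookup with default 2 is B's inline conditional tile expression
lemma tile_eq (c : Char) :
    ((((((((PySem.Dict.empty).insert '#' (0:Int)).insert '.' 1).insert '+' 1).insert '*' 1).insert ' ' 2).insert '@' 2).insert '$' 2).getD c 2
    = (if c = '#' then (0 : Int) else if c = '.' ∨ c = '+' ∨ c = '*' then 1 else 2) := by
  simp only [PySem.Dict.getD, PySem.Dict.get?, PySem.Dict.insert, PySem.Dict.empty]
  by_cases h1 : c = '#'; · subst h1; decide
  by_cases h2 : c = '.'; · subst h2; decide
  by_cases h3 : c = '+'; · subst h3; decide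
  by_cases h4 : c = '*'; · subst h4; decide
  by_cases h5 : c = ' '; · subst h5; decide
  by_cases h6 : c = '@'; · subst h6; decide
  by_cases h7 : c = '$'; · subst h7; decide
  have e1 : (('#':Char) == c) = false := beq_eq_false_iff_ne.mpr (fun h => h1 h.symm)
  have e2 : (('.':Char) == c) = false := beq_eq_false_iff_ne.mpr (fun h => h2 h.symm)
  have e3 : (('+':Char) == c) = false := beq_eq_false_iff_ne.mpr (fun h => h3 h.symm)
  have e4 : (('*':Char) == c) = false := beq_eq_false_iff_ne.mpr (fun h => h4 h.symm)
  have e5 : ((' ':Char) == c) = false := beq_eq_false_iff_ne.mpr (fun h => h5 h.symm)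
  have e6 : (('@':Char) == c) = false := beq_eq_false_iff_ne.mpr (fun h => h6 h.symm)
  have e7 : (('$':Char) == c) = false := beq_eq_false_iff_ne.mpr (fun h => h7 h.symm)
  simp [List.find?, e1, e2, e3, e4, e5, e6, e7, h1, h2, h3, h4]

lemma snd_mem_enum {α : Type} {xs : List α} {s : Int} {xc : Int × α}
    (h : xc ∈ PySem.List.enumerate xs s) : xc.2 ∈ xs := by
  have : xc.2 ∈ (PySem.List.enumerate xs s).map (fun p => p.2) := List.mem_map_of_mem h
  rwa [PySem.List.map_snd_enumerate] at this

lemma fst_nonneg_enum {α : Type} {xs : List α} {xc : Int × α}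
    (h : xc ∈ PySem.List.enumerate xs 0) : 0 ≤ xc.1 ∧ xc.1.toNat < xs.length := by
  rcases (PySem.List.mem_enumerate_iff _ _ _).mp h with ⟨k, hk, rfl⟩
  constructor
  · simp
  · simpa using hk

lemma find_pad (k : Nat) (x0 : Int) :
    ((PySem.List.enumerate (List.replicate k ' ') x0).reverse).find?
      (fun xc => xc.2 == '@' || xc.2 == '+') = none := by
  apply List.find?_eq_none.mpr
  intro xc hm
  have h2 : xc.2 = ' ' := List.eq_of_mem_replicate (snd_mem_enum (List.mem_reverse.mp hm))
  simp [h2]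

lemma filter_pad (k : Nat) (x0 : Int) :
    (PySem.List.enumerate (List.replicate k ' ') x0).filter
      (fun xc => xc.2 == '$' || xc.2 == '*') = [] := by
  apply List.filter_eq_nil_iff.mpr
  intro xc hm
  have h2 : xc.2 = ' ' := List.eq_of_mem_replicate (snd_mem_enum hm)
  simp [h2]

-- A's inner character loop, decomposed into per-line map / reverse-find / filter
lemma innerA (y : Int) (d : PySem.Dict Char Int) (s : List Char) :
    ∀ (x0 : Int) (row : List Int) (pl : Option (Int × Int)) (bx : List (Int × Int)),
    (PySem.List.enumerate s x0).foldl
      (fun (st : List Int × Option (Int × Int) × List (Int × Int)) xc =>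
        (st.1 ++ [d.getD xc.2 2],
         if xc.2 = '@' ∨ xc.2 = '+' then some (xc.1, y) else st.2.1,
         if xc.2 = '$' ∨ xc.2 = '*' then st.2.2 ++ [(xc.1, y)] else st.2.2))
      (row, pl, bx)
    = (row ++ s.map (fun c => d.getD c 2),
       (match ((PySem.List.enumerate s x0).reverse).find? (fun xc => xc.2 == '@' || xc.2 == '+') with
        | some xc => some (xc.1, y)
        | none => pl),
       bx ++ ((PySem.List.enumerate s x0).filter (fun xc => xc.2 == '$' || xc.2 == '*')).map (fun xc => (xc.1, y))) := by
  induction s with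
  | nil => intro x0 row pl bx; simp [PySem.List.enumerate_nil]
  | cons c cs ih =>
      intro x0 row pl bx
      rw [PySem.List.enumerate_cons, List.foldl_cons, ih]
      refine Prod.ext ?_ (Prod.ext ?_ ?_)
      · simp
      · simp only [List.reverse_cons, List.find?_append]
        cases h : ((PySem.List.enumerate cs (x0+1)).reverse).find? (fun xc => xc.2 == '@' || xc.2 == '+') with
        | some xc => simp
        | none =>
            by_cases hc : c = '@' ∨ c = '+'
            · have : ((c == '@' || c == '+') : Bool) = true := by
                rcases hc with h' | h' <;> simp [h']
              simp [List.find?, this, hc]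
            · have : ((c == '@' || c == '+') : Bool) = false := by
                push_neg at hc
                simp [hc.1, hc.2]
              simp [List.find?, this, hc]
      · simp only [List.filter_cons]
        by_cases hc : c = '$' ∨ c = '*'
        · have : ((c == '$' || c == '*') : Bool) = true := by
            rcases hc with h' | h' <;> simp [h']
          simp [this, hc]
        · have : ((c == '$' || c == '*') : Bool) = false := by
            push_neg at hc
            simp [hc.1, hc.2]
          simp [this, hc]

-- A's outer loop equals the puzzle map paired with a per-row position fold over unpadded rows
lemma outerA (w : Int) (d : PySem.Dict Char Int) (lines : List String) :
    ∀ (y0 : Int) (puz : List (List Int)) (pl : Option (Int × Int)) (bx : List (Int × Int)),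
    (PySem.List.enumerate lines y0).foldl
      (fun (acc : List (List Int) × Option (Int × Int) × List (Int × Int)) yl =>
        let inner :=
          (PySem.List.enumerate (pyLjust (PySem.Str.rstrip yl.2).toList w)).foldl
            (fun (st : List Int × Option (Int × Int) × List (Int × Int)) xc =>
              (st.1 ++ [d.getD xc.2 2],
               if xc.2 = '@' ∨ xc.2 = '+' then some (xc.1, yl.1) else st.2.1,
               if xc.2 = '$' ∨ xc.2 = '*' then st.2.2 ++ [(xc.1, yl.1)] else st.2.2))
            ([], acc.2.1, acc.2.2)
        (acc.1 ++ [inner.1], inner.2.1, inner.2.2))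
      (puz, pl, bx)
    = (puz ++ lines.map (fun line => (pyLjust (PySem.Str.rstrip line).toList w).map (fun c => d.getD c 2)),
       (PySem.List.enumerate (lines.map (fun line => (PySem.Str.rstrip line).toList)) y0).foldl
         (fun (st : Option (Int × Int) × List (Int × Int)) ys =>
           ((match ((PySem.List.enumerate ys.2).reverse).find? (fun xc => xc.2 == '@' || xc.2 == '+') with
             | some xc => some (xc.1, ys.1)
             | none => st.1),
            st.2 ++ ((PySem.List.enumerate ys.2).filter (fun xc => xc.2 == '$' || xc.2 == '*')).map (fun xc => (xc.1, ys.1))))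
         (pl, bx)) := by
  induction lines with
  | nil => intro y0 puz pl bx; simp [PySem.List.enumerate_nil]
  | cons l rest ih =>
      intro y0 puz pl bx
      simp only [List.map_cons, PySem.List.enumerate_cons, List.foldl_cons]
      rw [ih]
      simp only [innerA]
      have hsplit : PySem.List.enumerate (pyLjust (PySem.Str.rstrip l).toList w) 0
          = PySem.List.enumerate (PySem.Str.rstrip l).toList 0
            ++ PySem.List.enumerate (List.replicate (w.toNat - (PySem.Str.rstrip l).toList.length) ' ')
                 (0 + (PySem.Str.rstrip l).toList.length) := by
        simp only [pyLjust]
        exact PySem.List.enumerate_append _ _ 0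
      rw [hsplit]
      simp [List.find?_append, find_pad, filter_pad, List.filter_append, List.reverse_append]

-- ---------- rightmost-match machinery (B's rfind) ----------

-- rightmost index satisfying P, -1 if none (proof-side generalisation of pyRfindChar)
def rfP (P : Char → Bool) : List Char → Int
  | [] => -1
  | a :: t => if 0 ≤ rfP P t then rfP P t + 1 else if P a then 0 else -1

lemma rfP_ge (P : Char → Bool) (cs : List Char) : -1 ≤ rfP P cs := by
  induction cs with
  | nil => simp [rfP]
  | cons a t ih => simp only [rfP]; split_ifs <;> omega

lemma rfP_lt (P : Char → Bool) (cs : List Char) : rfP P cs < cs.length := by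
  induction cs with
  | nil => simp [rfP]
  | cons a t ih => simp only [rfP, List.length_cons]; split_ifs <;> push_cast <;> omega

lemma rfP_neg_iff (P : Char → Bool) (cs : List Char) :
    rfP P cs = -1 ↔ ∀ c ∈ cs, P c = false := by
  induction cs with
  | nil => simp [rfP]
  | cons a t ih =>
      have hge := rfP_ge P t
      simp only [rfP, List.mem_cons]
      constructor
      · intro h
        split_ifs at h with h1 h2
        · exact absurd h (by omega)
        · intro c hc
          rcases hc with rfl | hc
          · simpa using h2
          · exact (ih.mp (by omega)) c hc
      · intro h
        have ht : rfP P t = -1 := ih.mpr (fun c hc => h c (Or.inr hc))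
        have ha : P a = false := h a (Or.inl rfl)
        simp [ht, ha]

lemma pyRfindChar_eq_rfP (c : Char) (cs : List Char) :
    pyRfindChar cs c = rfP (fun x => x == c) cs := by
  induction cs with
  | nil => rfl
  | cons a t ih => simp only [pyRfindChar, rfP, ih]

lemma max_rfP (a b : Char) (cs : List Char) :
    max (rfP (fun x => x == a) cs) (rfP (fun x => x == b) cs)
    = rfP (fun x => x == a || x == b) cs := by
  induction cs with
  | nil => simp [rfP]
  | cons x t ih =>
      have ga := rfP_ge (fun x => x == a) t
      have gb := rfP_ge (fun x => x == b) t
      simp only [rfP, ← ih]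
      by_cases hxa : x = a <;> by_cases hxb : x = b <;>
        simp [hxa, hxb] <;> split_ifs <;> omega

lemma rfP_append (P : Char → Bool) (u v : List Char) :
    rfP P (u ++ v) = if 0 ≤ rfP P v then (u.length : Int) + rfP P v else rfP P u := by
  induction u with
  | nil =>
      have := rfP_ge P v
      simp only [List.nil_append, List.length_nil]
      split_ifs with hv
      · omega
      · simp only [rfP]; omega
  | cons a t ih =>
      have gv := rfP_ge P v
      have gt := rfP_ge P t
      have gtv := rfP_ge P (t ++ v)
      simp only [List.cons_append, rfP, ih, List.length_cons]
      split_ifs <;> push_cast <;> omega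

-- A's per-row reversed find, reduced to the rightmost-index function
lemma revfind_fst (P : Char → Bool) (r : List Char) :
    ∀ s : Int,
    (((PySem.List.enumerate r s).reverse).find? (fun xc => P xc.2)).map Prod.fst
    = if rfP P r = -1 then none else some (s + rfP P r) := by
  induction r with
  | nil => intro s; simp [PySem.List.enumerate_nil, rfP]
  | cons c t ih =>
      intro s
      have gt := rfP_ge P t
      rw [PySem.List.enumerate_cons]
      simp only [List.reverse_cons, List.find?_append]
      have iht := ih (s + 1)
      cases h : ((PySem.List.enumerate t (s + 1)).reverse).find? (fun xc => P xc.2) with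
      | some xc =>
          rw [h] at iht
          have h1 : ¬ rfP P t = -1 := by
            intro hh
            rw [if_pos hh] at iht
            simp at iht
          rw [if_neg h1] at iht
          have hx : xc.1 = s + 1 + rfP P t := by simpa using iht
          simp only [rfP]
          rw [if_pos (show (0:Int) ≤ rfP P t by omega),
              if_neg (show ¬ rfP P t + 1 = -1 by omega)]
          simp [hx]
          omega
      | none =>
          rw [h] at iht
          have ht : rfP P t = -1 := by
            by_contra hne
            rw [if_neg hne] at iht
            simp at iht
          simp only [rfP, ht]
          rw [if_neg (show ¬ (0:Int) ≤ -1 by omega)]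
          by_cases hc : P c = true
          · simp [List.find?, hc]
          · have hc' : P c = false := by simpa using hc
            simp [List.find?, hc']

-- ---------- flat-text coordinate machinery ----------

lemma coords_prefix (r rest : List Char) (h : '\n' ∉ r) (i : Int) (_h0 : 0 ≤ i)
    (hi : i.toNat ≤ r.length) :
    pvCoords (r ++ rest) i = (i, 0) := by
  unfold pvCoords
  rw [List.take_append_of_le_length hi]
  have hsub : ∀ c ∈ r.take i.toNat, (c == '\n') = false := by
    intro c hc
    have hcr : c ∈ r := List.mem_of_mem_take hc
    exact beq_eq_false_iff_ne.mpr (fun e => h (e ▸ hcr))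
  have h1 : rfP (fun x => x == '\n') (r.take i.toNat) = -1 := (rfP_neg_iff _ _).mpr hsub
  have h2 : (r.take i.toNat).count '\n' = 0 := by
    rw [List.count_eq_zero]
    intro hmem
    have := hsub '\n' hmem
    simp at this
  rw [pyRfindChar_eq_rfP, h1, h2]
  simp

lemma coords_shift (r t : List Char) (h : '\n' ∉ r) (j : Int) (hj : 0 ≤ j) :
    pvCoords (r ++ '\n' :: t) ((r.length : Int) + 1 + j)
    = ((pvCoords t j).1, (pvCoords t j).2 + 1) := by
  unfold pvCoords
  have htn : ((r.length : Int) + 1 + j).toNat = r.length + 1 + j.toNat := by omega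
  have htake : (r ++ '\n' :: t).take ((r.length : Int) + 1 + j).toNat
      = r ++ '\n' :: t.take j.toNat := by
    rw [htn, List.take_append]
    have e1 : List.take (r.length + 1 + j.toNat) r = r := List.take_of_length_le (by omega)
    have e2 : r.length + 1 + j.toNat - r.length = j.toNat + 1 := by omega
    rw [e1, e2, List.take_succ_cons]
  rw [htake]
  have hcount : (r ++ '\n' :: t.take j.toNat).count '\n'
      = (t.take j.toNat).count '\n' + 1 := by
    have hr0 : r.count '\n' = 0 := List.count_eq_zero.mpr h
    simp [List.count_append, hr0]
  have gtj := rfP_ge (fun x => x == '\n') (t.take j.toNat)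
  have hhead : rfP (fun x => x == '\n') ('\n' :: t.take j.toNat)
      = if 0 ≤ rfP (fun x => x == '\n') (t.take j.toNat)
        then rfP (fun x => x == '\n') (t.take j.toNat) + 1 else 0 := by
    simp only [rfP]; split_ifs <;> first | rfl | simp_all
  have happ := rfP_append (fun x => x == '\n') r ('\n' :: t.take j.toNat)
  rw [pyRfindChar_eq_rfP, pyRfindChar_eq_rfP, happ, hhead, hcount]
  have h0cons : (0 : Int) ≤ (if 0 ≤ rfP (fun x => x == '\n') (t.take j.toNat)
        then rfP (fun x => x == '\n') (t.take j.toNat) + 1 else 0) := by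
    split_ifs <;> omega
  rw [if_pos h0cons]
  simp only [Prod.mk.injEq]
  constructor
  · split_ifs <;> push_cast <;> omega
  · push_cast
    ring

-- enumerate with an offset start is a shift of enumerate from 0
lemma enum_ofs {α : Type} (xs : List α) : ∀ (a b : Int),
    PySem.List.enumerate xs (a + b) = (PySem.List.enumerate xs a).map (fun p => (p.1 + b, p.2)) := by
  induction xs with
  | nil => intro a b; simp [PySem.List.enumerate_nil]
  | cons x t ih =>
      intro a b
      simp only [PySem.List.enumerate_cons, List.map_cons]
      rw [show a + b + 1 = (a + 1) + b by ring, ih]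

-- Chars.join on the cons of a nonempty tail
lemma joinNl_cons (r : List Char) (rs : List (List Char)) (h : rs ≠ []) :
    PySem.Chars.join ['\n'] (r :: rs) = r ++ '\n' :: PySem.Chars.join ['\n'] rs := by
  cases rs with
  | nil => exact absurd rfl h
  | cons b t => rw [PySem.Chars.join_cons_cons]; simp

-- B's flat player search equals A's per-row overwrite fold
lemma playerFold : ∀ (rows : List (List Char)), (∀ r ∈ rows, '\n' ∉ r) →
    ∀ (y0 : Int) (st0 : Option (Int × Int)),
    (PySem.List.enumerate rows y0).foldl
      (fun (st : Option (Int × Int)) ys =>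
        match ((PySem.List.enumerate ys.2).reverse).find? (fun xc => xc.2 == '@' || xc.2 == '+') with
        | some xc => some (xc.1, ys.1)
        | none => st) st0
    = (if rfP (fun x => x == '@' || x == '+') (PySem.Chars.join ['\n'] rows) = -1 then st0
       else some ((pvCoords (PySem.Chars.join ['\n'] rows) (rfP (fun x => x == '@' || x == '+') (PySem.Chars.join ['\n'] rows))).1,
                  y0 + (pvCoords (PySem.Chars.join ['\n'] rows) (rfP (fun x => x == '@' || x == '+') (PySem.Chars.join ['\n'] rows))).2)) := by
  intro rows
  induction rows with
  | nil =>
      intro _ y0 st0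
      simp [PySem.List.enumerate_nil, PySem.Chars.join_nil, rfP]
  | cons r rs ih =>
      intro hnl y0 st0
      have hr : '\n' ∉ r := hnl r List.mem_cons_self
      have hrs : ∀ a ∈ rs, '\n' ∉ a := fun a ha => hnl a (List.mem_cons_of_mem _ ha)
      rw [PySem.List.enumerate_cons]
      simp only [List.foldl_cons]
      have hrow := revfind_fst (fun x => x == '@' || x == '+') r 0
      have hge_r := rfP_ge (fun x => x == '@' || x == '+') r
      have hlt_r := rfP_lt (fun x => x == '@' || x == '+') r
      cases rs with
      | nil =>
          rw [PySem.List.enumerate_nil, List.foldl_nil, PySem.Chars.join_singleton]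
          cases hf : ((PySem.List.enumerate r 0).reverse).find? (fun xc => xc.2 == '@' || xc.2 == '+') with
          | some xc =>
              rw [hf] at hrow
              have hne : ¬ rfP (fun x => x == '@' || x == '+') r = -1 := by
                intro hh; rw [if_pos hh] at hrow; simp at hrow
              rw [if_neg hne] at hrow
              have hx : xc.1 = rfP (fun x => x == '@' || x == '+') r := by simpa using hrow
              rw [if_neg hne]
              have hco : pvCoords (r ++ ([] : List Char)) (rfP (fun x => x == '@' || x == '+') r)
                  = (rfP (fun x => x == '@' || x == '+') r, 0) :=
                coords_prefix r [] hr _ (by omega) (by omega)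
              rw [List.append_nil] at hco
              simp [hco, hx]
          | none =>
              rw [hf] at hrow
              have heq : rfP (fun x => x == '@' || x == '+') r = -1 := by
                by_contra hne; rw [if_neg hne] at hrow; simp at hrow
              simp [heq]
      | cons r' rs' =>
          rw [joinNl_cons r (r' :: rs') (by simp)]
          have hge' := rfP_ge (fun x => x == '@' || x == '+') (PySem.Chars.join ['\n'] (r' :: rs'))
          have happ := rfP_append (fun x => x == '@' || x == '+') r ('\n' :: PySem.Chars.join ['\n'] (r' :: rs'))
          have hcons : rfP (fun x => x == '@' || x == '+') ('\n' :: PySem.Chars.join ['\n'] (r' :: rs'))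
              = if 0 ≤ rfP (fun x => x == '@' || x == '+') (PySem.Chars.join ['\n'] (r' :: rs'))
                then rfP (fun x => x == '@' || x == '+') (PySem.Chars.join ['\n'] (r' :: rs')) + 1 else -1 := by
            simp only [rfP]
            split_ifs <;> first | rfl | simp_all
          rw [hcons] at happ
          by_cases hA : 0 ≤ rfP (fun x => x == '@' || x == '+') (PySem.Chars.join ['\n'] (r' :: rs'))
          · -- the flat rightmost marker lies in the tail rows
            rw [if_pos hA, if_pos (by omega)] at happ
            have hsh := coords_shift r (PySem.Chars.join ['\n'] (r' :: rs')) hr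
              (rfP (fun x => x == '@' || x == '+') (PySem.Chars.join ['\n'] (r' :: rs'))) hA
            cases hf : ((PySem.List.enumerate r 0).reverse).find? (fun xc => xc.2 == '@' || xc.2 == '+') with
            | some xc =>
                rw [ih hrs (y0 + 1) (some (xc.1, y0)), if_neg (by omega), happ]
                rw [show (r.length : Int) + (rfP (fun x => x == '@' || x == '+') (PySem.Chars.join ['\n'] (r' :: rs')) + 1)
                      = (r.length : Int) + 1 + rfP (fun x => x == '@' || x == '+') (PySem.Chars.join ['\n'] (r' :: rs')) by ring]
                rw [hsh, if_neg (by omega)]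
                simp only [Prod.mk.injEq, Option.some.injEq, true_and]
                ring
            | none =>
                rw [ih hrs (y0 + 1) st0, if_neg (by omega), happ]
                rw [show (r.length : Int) + (rfP (fun x => x == '@' || x == '+') (PySem.Chars.join ['\n'] (r' :: rs')) + 1)
                      = (r.length : Int) + 1 + rfP (fun x => x == '@' || x == '+') (PySem.Chars.join ['\n'] (r' :: rs')) by ring]
                rw [hsh, if_neg (by omega)]
                simp only [Prod.mk.injEq, Option.some.injEq, true_and]
                ring
          · -- no marker in the tail rows: the result is the first row's, with fallback st0
            rw [if_neg hA, if_neg (by omega)] at happ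
            cases hf : ((PySem.List.enumerate r 0).reverse).find? (fun xc => xc.2 == '@' || xc.2 == '+') with
            | some xc =>
                rw [hf] at hrow
                have hne : ¬ rfP (fun x => x == '@' || x == '+') r = -1 := by
                  intro hh; rw [if_pos hh] at hrow; simp at hrow
                rw [if_neg hne] at hrow
                have hx : xc.1 = rfP (fun x => x == '@' || x == '+') r := by simpa using hrow
                rw [ih hrs (y0 + 1) (some (xc.1, y0)), if_pos (by omega), happ, if_neg hne]
                have hco : pvCoords (r ++ '\n' :: PySem.Chars.join ['\n'] (r' :: rs'))
                    (rfP (fun x => x == '@' || x == '+') r)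
                    = (rfP (fun x => x == '@' || x == '+') r, 0) :=
                  coords_prefix r _ hr _ (by omega) (by omega)
                rw [hco]
                simp [hx]
            | none =>
                rw [hf] at hrow
                have heq : rfP (fun x => x == '@' || x == '+') r = -1 := by
                  by_contra hne; rw [if_neg hne] at hrow; simp at hrow
                rw [ih hrs (y0 + 1) st0, if_pos (by omega), happ, if_pos heq]

-- B's flat box scan equals A's per-row append fold
lemma boxFold : ∀ (rows : List (List Char)), (∀ r ∈ rows, '\n' ∉ r) →
    ∀ (y0 : Int) (bx0 : List (Int × Int)),
    (PySem.List.enumerate rows y0).foldl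
      (fun (bx : List (Int × Int)) ys =>
        bx ++ ((PySem.List.enumerate ys.2).filter (fun xc => xc.2 == '$' || xc.2 == '*')).map (fun xc => (xc.1, ys.1))) bx0
    = bx0 ++ ((PySem.List.enumerate (PySem.Chars.join ['\n'] rows)).filter (fun p => p.2 == '$' || p.2 == '*')).map
        (fun p => ((pvCoords (PySem.Chars.join ['\n'] rows) p.1).1,
                   y0 + (pvCoords (PySem.Chars.join ['\n'] rows) p.1).2)) := by
  intro rows
  induction rows with
  | nil =>
      intro _ y0 bx0
      simp [PySem.List.enumerate_nil, PySem.Chars.join_nil]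
  | cons r rs ih =>
      intro hnl y0 bx0
      have hr : '\n' ∉ r := hnl r List.mem_cons_self
      have hrs : ∀ a ∈ rs, '\n' ∉ a := fun a ha => hnl a (List.mem_cons_of_mem _ ha)
      rw [PySem.List.enumerate_cons]
      simp only [List.foldl_cons]
      cases rs with
      | nil =>
          rw [PySem.List.enumerate_nil, List.foldl_nil, PySem.Chars.join_singleton]
          congr 1
          apply List.map_congr_left
          intro p hp
          have hpb := fst_nonneg_enum (List.mem_of_mem_filter hp)
          have hco := coords_prefix r [] hr p.1 hpb.1 (by omega)
          rw [List.append_nil] at hco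
          simp [hco]
      | cons r' rs' =>
          rw [joinNl_cons r (r' :: rs') (by simp)]
          rw [ih hrs (y0 + 1)
            (bx0 ++ ((PySem.List.enumerate r).filter (fun xc => xc.2 == '$' || xc.2 == '*')).map (fun xc => (xc.1, y0)))]
          rw [PySem.List.enumerate_append, List.filter_append, List.map_append]
          rw [PySem.List.enumerate_cons]
          have hfalse : ((('\n' : Char) == '$') || (('\n' : Char) == '*')) = false := by decide
          simp only [List.filter_cons, hfalse, Bool.false_eq_true, if_false]
          have hofs : PySem.List.enumerate (PySem.Chars.join ['\n'] (r' :: rs')) (0 + (r.length : Int) + 1)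
              = (PySem.List.enumerate (PySem.Chars.join ['\n'] (r' :: rs'))).map
                  (fun p => (p.1 + ((r.length : Int) + 1), p.2)) := by
            have h0 := enum_ofs (PySem.Chars.join ['\n'] (r' :: rs')) 0 ((r.length : Int) + 1)
            rw [show (0 : Int) + ((r.length : Int) + 1) = 0 + (r.length : Int) + 1 by ring] at h0
            exact h0
          rw [hofs, List.filter_map, List.map_map, List.append_assoc]
          congr 1
          congr 1
          · -- first-row chunk: coordinates within the prefix r
            apply List.map_congr_left
            intro p hp
            have hpb := fst_nonneg_enum (List.mem_of_mem_filter hp)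
            have hco := coords_prefix r ('\n' :: PySem.Chars.join ['\n'] (r' :: rs')) hr p.1 hpb.1 (by omega)
            simp [hco]
          · -- tail chunk: coordinates shifted past r and the '\n'
            have hfeq : (PySem.List.enumerate (PySem.Chars.join ['\n'] (r' :: rs'))).filter
                  ((fun p => p.2 == '$' || p.2 == '*') ∘ (fun p => (p.1 + ((r.length : Int) + 1), p.2)))
                = (PySem.List.enumerate (PySem.Chars.join ['\n'] (r' :: rs'))).filter
                  (fun p => p.2 == '$' || p.2 == '*') := by
              apply List.filter_congr
              intro p _
              rfl
            rw [hfeq]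
            apply List.map_congr_left
            intro p hp
            have hpb := fst_nonneg_enum (List.mem_of_mem_filter hp)
            have hsh := coords_shift r (PySem.Chars.join ['\n'] (r' :: rs')) hr p.1 hpb.1
            simp only [Function.comp_def]
            rw [show p.1 + ((r.length : Int) + 1) = (r.length : Int) + 1 + p.1 by ring, hsh]
            simp only [Prod.mk.injEq, true_and]
            ring

-- the combined (player, boxes) state of A's positions fold splits componentwise
lemma splitPB : ∀ (l : List (Int × List Char)) (a : Option (Int × Int)) (b : List (Int × Int)),
    l.foldl
      (fun (st : Option (Int × Int) × List (Int × Int)) ys =>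
        ((match ((PySem.List.enumerate ys.2).reverse).find? (fun xc => xc.2 == '@' || xc.2 == '+') with
          | some xc => some (xc.1, ys.1)
          | none => st.1),
         st.2 ++ ((PySem.List.enumerate ys.2).filter (fun xc => xc.2 == '$' || xc.2 == '*')).map (fun xc => (xc.1, ys.1))))
      (a, b)
    = (l.foldl
        (fun (st : Option (Int × Int)) ys =>
          match ((PySem.List.enumerate ys.2).reverse).find? (fun xc => xc.2 == '@' || xc.2 == '+') with
          | some xc => some (xc.1, ys.1)
          | none => st) a,
       l.foldl
        (fun (bx : List (Int × Int)) ys =>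
          bx ++ ((PySem.List.enumerate ys.2).filter (fun xc => xc.2 == '$' || xc.2 == '*')).map (fun xc => (xc.1, ys.1))) b) := by
  intro l
  induction l with
  | nil => intro a b; rfl
  | cons x t ih =>
      intro a b
      simp only [List.foldl_cons]
      exact ih _ _

-- ===== VERDICT (by name: the statement is the Claim_ definition above) =====
theorem convert_sokoban_to_array_spec : Claim_equal_convert_sokoban_to_array := by
  intro lines _ hpre
  obtain ⟨hne, hnl⟩ := hpre
  have hnl' : ∀ r ∈ lines.map (fun line => (PySem.Str.rstrip line).toList), '\n' ∉ r := by
    intro r hr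
    rcases List.mem_map.mp hr with ⟨l, hl, rfl⟩
    exact hnl l hl
  simp only [Spec_convert_sokoban_to_array, convert_sokoban_to_array, convert_sokoban_to_array_alt]
  have hmm : (lines.map (fun line => (PySem.Str.rstrip line).toList)).map (fun r => (r.length : Int))
      = lines.map (fun line => PySem.Str.len (PySem.Str.rstrip line)) := by
    rw [List.map_map]
    apply List.map_congr_left
    intro l _
    simp [PySem.Str.len_eq]
  rw [hmm]
  rw [outerA, splitPB]
  rw [playerFold _ hnl' 0 none, boxFold _ hnl' 0 []]
  refine Prod.ext ?_ (Prod.ext ?_ ?_)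
  · -- the puzzle grids agree
    simp only [List.map_map]
    apply List.map_congr_left
    intro l _
    simp only [Function.comp_def]
    apply List.map_congr_left
    intro c _
    exact tile_eq c
  · -- the player positions agree
    by_cases hrf : rfP (fun x => x == '@' || x == '+')
        (PySem.Chars.join ['\n'] (lines.map (fun line => (PySem.Str.rstrip line).toList))) = -1
    · simp [pyRfindChar_eq_rfP, max_rfP]
    · simp [pyRfindChar_eq_rfP, max_rfP]
  · -- the box lists agree
    simp
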